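-- pv_equiv track=rewrite | github.com/haolunc/ARC-RL | reference_solutions/solutions/007bbfb7.py | transform
-- ===== SOURCE A (Python) =====
-- def transform(grid):
--     n = len(grid)
--     size = n * n
--     out = [[0 for _ in range(size)] for _ in range(size)]
--
--     for br in range(n):
--         for bc in range(n):
--             if grid[br][bc] != 0:
--                 for i in range(n):
--                     for j in range(n):
--                         out[br * n + i][bc * n + j] = grid[i][j]
--     return out
-- ===== SOURCE B (Python) =====
-- def transform(grid):
--     n = len(grid)
--     out = []
--     for br in range(n):
--         for i in range(n):
--             row = []
--             for bc in range(n):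
--                 if grid[br][bc] != 0:
--                     row += grid[i][:n]
--                 else:
--                     row += [0] * n
--             out.append(row)
--     return out
-- ===== Notes on version B (the rewrite author's own statement) =====
-- stated objective: alternative
-- what changed: B assembles each output row directly as a concatenation of n row-pieces (a copy of grid[i][:n] or n zeros per block-column), instead of A's preallocating an n^2 x n^2 zero matrix and scattering nonzero blocks into it by index assignment.
import Mathlib
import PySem

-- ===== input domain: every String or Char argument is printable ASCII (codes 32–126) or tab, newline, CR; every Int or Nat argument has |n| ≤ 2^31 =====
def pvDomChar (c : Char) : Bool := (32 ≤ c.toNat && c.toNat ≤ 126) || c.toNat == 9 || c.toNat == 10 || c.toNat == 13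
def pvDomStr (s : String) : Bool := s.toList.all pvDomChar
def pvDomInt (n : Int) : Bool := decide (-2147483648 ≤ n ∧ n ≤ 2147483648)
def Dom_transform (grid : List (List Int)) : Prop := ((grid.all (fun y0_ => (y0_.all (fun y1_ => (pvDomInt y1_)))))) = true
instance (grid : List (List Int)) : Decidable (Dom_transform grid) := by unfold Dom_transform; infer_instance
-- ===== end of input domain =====

-- B assembles each output row as a concatenation of n row-pieces instead of A's
-- preallocate-zeros-then-scatter-blocks; same asymptotic cost, different decomposition.

-- ===== PORT A =====
-- Indexing grid[br][bc] / grid[i][j] is ported with getD: under Pre_transform every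
-- such index is in range, so getD is exact for Python's (raising) indexing there.
def transform (grid : List (List Int)) : List (List Int) :=
  let n := grid.length
  let size := n * n
  let out0 := (List.range size).map (fun _ => (List.range size).map (fun _ => (0 : Int)))
  (List.range n).foldl (fun out br =>
    (List.range n).foldl (fun out bc =>
      if (grid.getD br []).getD bc 0 ≠ 0 then
        (List.range n).foldl (fun out i =>
          (List.range n).foldl (fun out j =>
            out.set (br * n + i)
              ((out.getD (br * n + i) []).set (bc * n + j) ((grid.getD i []).getD j 0))) out) out
      else out) out) out0

-- ===== PORT B =====
-- grid[i][:n] is ported as .take n (exact: n = len(grid) ≥ 0); grid[br][bc] as getD,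
-- in range under Pre_transform.
def transform_alt (grid : List (List Int)) : List (List Int) :=
  let n := grid.length
  (List.range n).foldl (fun out br =>
    (List.range n).foldl (fun out i =>
      let row := (List.range n).foldl (fun row bc =>
        if (grid.getD br []).getD bc 0 ≠ 0 then row ++ (grid.getD i []).take n
        else row ++ List.replicate n 0) []
      out ++ [row]) out) []

-- ===== PRECONDITION & SPEC =====
-- Pre_: every row has at least len(grid) entries — exactly the inputs where Python A
-- returns normally (otherwise grid[br][bc] raises IndexError).
def Pre_transform (grid : List (List Int)) : Prop :=
  ∀ row ∈ grid, grid.length ≤ row.length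
instance (grid : List (List Int)) : Decidable (Pre_transform grid) := by
  unfold Pre_transform; infer_instance

def pvWitness_transform : List (List Int) := [[1, 0], [0, 2]]

def Spec_transform (grid : List (List Int)) (out : List (List Int)) : Prop := out = transform_alt grid
instance (grid : List (List Int)) (out : List (List Int)) : Decidable (Spec_transform grid out) := by unfold Spec_transform; infer_instance

-- ===== CLAIM (what is proved, stated in full; the proofs are below) =====
def Claim_equal_transform : Prop := ∀ (grid : List (List Int)), Dom_transform grid → Pre_transform grid → Spec_transform grid (transform grid)

-- ===== LEMMAS AND PROOFS =====

-- entry of grid at (r, c), with getD defaults (matches both ports' indexing)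
def gEnt (grid : List (List Int)) (r c : ℕ) : Int := (grid.getD r []).getD c 0

-- a size × size matrix given by an entry function
def mkMat (s : ℕ) (E : ℕ → ℕ → Int) : List (List Int) :=
  (List.range s).map (fun r => (List.range s).map (fun c => E r c))

lemma mkMat_congr {s : ℕ} {E E' : ℕ → ℕ → Int}
    (h : ∀ r c, r < s → c < s → E r c = E' r c) : mkMat s E = mkMat s E' := by
  unfold mkMat
  refine List.map_congr_left (fun r hr => ?_)
  exact List.map_congr_left (fun c hc => h r c (List.mem_range.1 hr) (List.mem_range.1 hc))

lemma getD_mkMat {s r : ℕ} (E : ℕ → ℕ → Int) (hr : r < s) :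
    (mkMat s E).getD r [] = (List.range s).map (fun c => E r c) := by
  unfold mkMat
  rw [List.getD_eq_getElem?_getD, List.getElem?_map, List.getElem?_range hr]
  rfl

lemma set_map_range {α : Type} {s c : ℕ} (f : ℕ → α) (v : α) (_hc : c < s) :
    ((List.range s).map f).set c v
      = (List.range s).map (fun c' => if c' = c then v else f c') := by
  apply List.ext_getElem
  · simp
  · intro i h1 h2
    simp only [List.getElem_set, List.getElem_map, List.getElem_range]
    by_cases h : c = i
    · simp [h]
    · simp [h, Ne.symm h]

lemma set_mkMat {s r : ℕ} (E : ℕ → ℕ → Int) (f : ℕ → Int) (_hr : r < s) :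
    (mkMat s E).set r ((List.range s).map f)
      = mkMat s (fun r' c' => if r' = r then f c' else E r' c') := by
  unfold mkMat
  apply List.ext_getElem
  · simp
  · intro i h1 h2
    simp only [List.getElem_set, List.getElem_map, List.getElem_range]
    by_cases h : r = i
    · simp [h]
    · simp [h, Ne.symm h]

-- nested foldl over two lists = foldl over the pair list
lemma foldl_nest {α β γ : Type} (l1 : List α) (l2 : List β) (f : γ → α → β → γ) (init : γ) :
    l1.foldl (fun o a => l2.foldl (fun o b => f o a b) o) init
      = (l1.flatMap (fun a => l2.map (Prod.mk a))).foldl (fun o p => f o p.1 p.2) init := by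
  induction l1 generalizing init with
  | nil => rfl
  | cons a t ih => simp [List.foldl_append, List.foldl_map, ih]

-- flatMap of n-length blocks over range m = one map over range (m*n) with div/mod
lemma flat_blocks {α : Type} (m n : ℕ) (f : ℕ → ℕ → α) :
    (List.range m).flatMap (fun k => (List.range n).map (f k))
      = (List.range (m * n)).map (fun c => f (c / n) (c % n)) := by
  induction m with
  | zero => simp
  | succ m ih =>
    rw [List.range_succ, List.flatMap_append, ih, Nat.succ_mul, List.range_add,
      List.map_append, List.map_map]
    congr 1
    simp only [List.flatMap_singleton]
    refine (List.map_congr_left (fun j hj => ?_)).symm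
    have hj' := List.mem_range.1 hj
    have hn : 0 < n := by omega
    have h1 : (m * n + j) / n = m := by
      rw [Nat.mul_comm m n, Nat.mul_add_div hn, Nat.div_eq_of_lt hj', Nat.add_zero]
    have h2 : (m * n + j) % n = j := by
      rw [Nat.mul_comm m n, Nat.mul_add_mod, Nat.mod_eq_of_lt hj']
    rw [Function.comp, h1, h2]

lemma blk_lt {n br i : ℕ} (hbr : br < n) (hi : i < n) : br * n + i < n * n :=
  calc br * n + i < br * n + n := by omega
  _ = (br + 1) * n := by ring
  _ ≤ n * n := Nat.mul_le_mul_right n hbr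

lemma blk_div {n br i : ℕ} (hi : i < n) : (br * n + i) / n = br := by
  have hn : 0 < n := Nat.pos_of_ne_zero (by rintro rfl; omega)
  rw [Nat.mul_comm br n, Nat.mul_add_div hn, Nat.div_eq_of_lt hi, Nat.add_zero]

lemma blk_mod {n br i : ℕ} (hi : i < n) : (br * n + i) % n = i := by
  rw [Nat.mul_comm br n, Nat.mul_add_mod, Nat.mod_eq_of_lt hi]

lemma blk_eq_iff {n br i r : ℕ} (hi : i < n) : r = br * n + i ↔ r / n = br ∧ r % n = i := by
  constructor
  · rintro rfl; exact ⟨blk_div hi, blk_mod hi⟩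
  · rintro ⟨h1, h2⟩; conv_lhs => rw [← Nat.div_add_mod r n]
    rw [h1, h2, Nat.mul_comm]

lemma lt_sq_div_mod {n r : ℕ} (h : r < n * n) : r / n < n ∧ r % n < n := by
  have hn : 0 < n := by
    rcases Nat.eq_zero_or_pos n with rfl | h1
    · exact absurd h (by simp)
    · exact h1
  exact ⟨Nat.div_lt_of_lt_mul h, Nat.mod_lt _ hn⟩

def pairList (n : ℕ) : List (ℕ × ℕ) :=
  (List.range n).flatMap (fun a => (List.range n).map (Prod.mk a))

lemma mem_pairList {n : ℕ} {p : ℕ × ℕ} : p ∈ pairList n ↔ p.1 < n ∧ p.2 < n := by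
  cases p; simp [pairList, List.mem_flatMap]

-- entry function of A's matrix after the blocks in S have been processed
def Epart (grid : List (List Int)) (S : List (ℕ × ℕ)) (r c : ℕ) : Int :=
  let n := grid.length
  if (r / n, c / n) ∈ S ∧ gEnt grid (r / n) (c / n) ≠ 0 then gEnt grid (r % n) (c % n) else 0

-- entry function during the inner write of block (br, bc): inner cells in T written
def EB (grid : List (List Int)) (S : List (ℕ × ℕ)) (br bc : ℕ) (T : List (ℕ × ℕ)) (r c : ℕ) : Int :=
  let n := grid.length
  if r / n = br ∧ c / n = bc ∧ (r % n, c % n) ∈ T then gEnt grid (r % n) (c % n)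
  else Epart grid S r c

lemma inner_fold (grid : List (List Int)) (br bc : ℕ) (S : List (ℕ × ℕ))
    (hbr : br < grid.length) (hbc : bc < grid.length)
    (P T : List (ℕ × ℕ)) (hP : ∀ p ∈ P, p.1 < grid.length ∧ p.2 < grid.length) :
    P.foldl (fun out p =>
        out.set (br * grid.length + p.1)
          ((out.getD (br * grid.length + p.1) []).set (bc * grid.length + p.2)
            ((grid.getD p.1 []).getD p.2 0)))
      (mkMat (grid.length * grid.length) (EB grid S br bc T))
      = mkMat (grid.length * grid.length) (EB grid S br bc (T ++ P)) := by
  induction P generalizing T with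
  | nil => simp
  | cons p P ih =>
    obtain ⟨i, j⟩ := p
    have hi : i < grid.length := (hP (i, j) (by simp)).1
    have hj : j < grid.length := (hP (i, j) (by simp)).2
    simp only [List.foldl_cons]
    rw [getD_mkMat _ (blk_lt hbr hi), set_map_range _ _ (blk_lt hbc hj),
      set_mkMat _ _ (blk_lt hbr hi)]
    rw [mkMat_congr (E' := EB grid S br bc (T ++ [(i, j)])) ?_]
    · rw [ih (T ++ [(i, j)]) (fun q hq => hP q (List.mem_cons_of_mem _ hq)),
        List.append_assoc, List.singleton_append]
    · intro r c hr hc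
      by_cases hrc : r = br * grid.length + i ∧ c = bc * grid.length + j
      · obtain ⟨rfl, rfl⟩ := hrc
        simp [EB, gEnt, blk_div hi, blk_mod hi, blk_div hj, blk_mod hj]
      · have key : ¬(r / grid.length = br ∧ c / grid.length = bc ∧
            (r % grid.length, c % grid.length) = (i, j)) := by
          rintro ⟨h1, h2, h3⟩
          rw [Prod.mk.injEq] at h3
          exact hrc ⟨(blk_eq_iff hi).2 ⟨h1, h3.1⟩, (blk_eq_iff hj).2 ⟨h2, h3.2⟩⟩
        have hL : (if r = br * grid.length + i then
              (if c = bc * grid.length + j then (grid.getD i []).getD j 0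
               else EB grid S br bc T (br * grid.length + i) c)
            else EB grid S br bc T r c) = EB grid S br bc T r c := by
          by_cases h1 : r = br * grid.length + i
          · subst h1; rw [if_pos rfl, if_neg (fun h2 => hrc ⟨rfl, h2⟩)]
          · rw [if_neg h1]
        rw [hL]
        simp only [EB, List.mem_append, List.mem_singleton]
        refine if_congr ?_ rfl rfl
        constructor
        · rintro ⟨a, b, m⟩; exact ⟨a, b, Or.inl m⟩
        · rintro ⟨a, b, m | e⟩
          · exact ⟨a, b, m⟩
          · exact absurd ⟨a, b, e⟩ key

lemma outer_fold (grid : List (List Int)) (L S : List (ℕ × ℕ))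
    (hL : ∀ p ∈ L, p.1 < grid.length ∧ p.2 < grid.length) :
    L.foldl (fun out p =>
        if (grid.getD p.1 []).getD p.2 0 ≠ 0 then
          (List.range grid.length).foldl (fun out i =>
            (List.range grid.length).foldl (fun out j =>
              out.set (p.1 * grid.length + i)
                ((out.getD (p.1 * grid.length + i) []).set (p.2 * grid.length + j)
                  ((grid.getD i []).getD j 0))) out) out
        else out)
      (mkMat (grid.length * grid.length) (Epart grid S))
      = mkMat (grid.length * grid.length) (Epart grid (S ++ L)) := by
  induction L generalizing S with
  | nil => simp
  | cons p L ih =>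
    obtain ⟨br, bc⟩ := p
    have hbr : br < grid.length := (hL (br, bc) (by simp)).1
    have hbc : bc < grid.length := (hL (br, bc) (by simp)).2
    simp only [List.foldl_cons]
    by_cases hz : (grid.getD br []).getD bc 0 ≠ 0
    · rw [if_pos hz, foldl_nest, show List.flatMap (fun a => List.map (Prod.mk a)
          (List.range grid.length)) (List.range grid.length) = pairList grid.length from rfl,
        mkMat_congr (E' := EB grid S br bc []) (by intro r c _ _; simp [EB]),
        inner_fold grid br bc S hbr hbc (pairList grid.length) []
          (fun q hq => mem_pairList.1 hq),
        mkMat_congr (E' := Epart grid (S ++ [(br, bc)])) ?_]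
      · rw [ih (S ++ [(br, bc)]) (fun q hq => hL q (List.mem_cons_of_mem _ hq)),
          List.append_assoc, List.singleton_append]
      · intro r c hr hc
        obtain ⟨hdr, hmr⟩ := lt_sq_div_mod hr
        obtain ⟨hdc, hmc⟩ := lt_sq_div_mod hc
        have hm : (r % grid.length, c % grid.length) ∈ pairList grid.length :=
          mem_pairList.2 ⟨hmr, hmc⟩
        simp only [EB, Epart, List.nil_append, List.mem_append, List.mem_singleton, hm, and_true]
        by_cases h1 : r / grid.length = br ∧ c / grid.length = bc
        · obtain ⟨e1, e2⟩ := h1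
          rw [if_pos ⟨e1, e2⟩, if_pos ⟨Or.inr (by rw [e1, e2]), by rw [e1, e2]; exact hz⟩]
        · rw [if_neg h1]
          refine if_congr ?_ rfl rfl
          constructor
          · rintro ⟨m, hg⟩; exact ⟨Or.inl m, hg⟩
          · rintro ⟨m | e, hg⟩
            · exact ⟨m, hg⟩
            · exact absurd ⟨congrArg Prod.fst e, congrArg Prod.snd e⟩ h1
    · rw [if_neg hz,
        mkMat_congr (E' := Epart grid (S ++ [(br, bc)])) ?_,
        ih (S ++ [(br, bc)]) (fun q hq => hL q (List.mem_cons_of_mem _ hq)),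
        List.append_assoc, List.singleton_append]
      intro r c hr hc
      simp only [Epart, List.mem_append, List.mem_singleton]
      refine if_congr ?_ rfl rfl
      constructor
      · rintro ⟨m, hg⟩; exact ⟨Or.inl m, hg⟩
      · rintro ⟨m | e, hg⟩
        · exact ⟨m, hg⟩
        · have e1 : r / grid.length = br := congrArg Prod.fst e
          have e2 : c / grid.length = bc := congrArg Prod.snd e
          exact absurd (by rw [gEnt, e1, e2]; exact not_not.1 hz) hg

lemma transform_eq_mkMat (grid : List (List Int)) :
    transform grid = mkMat (grid.length * grid.length)
      (fun r c =>
        if gEnt grid (r / grid.length) (c / grid.length) ≠ 0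
        then gEnt grid (r % grid.length) (c % grid.length) else 0) := by
  simp only [transform]
  rw [show (List.range (grid.length * grid.length)).map
        (fun _ => (List.range (grid.length * grid.length)).map (fun _ => (0 : Int)))
      = mkMat (grid.length * grid.length) (fun _ _ => 0) from rfl,
    mkMat_congr (E' := Epart grid []) (by intro r c _ _; simp [Epart]),
    foldl_nest,
    show List.flatMap (fun a => List.map (Prod.mk a) (List.range grid.length))
      (List.range grid.length) = pairList grid.length from rfl,
    outer_fold grid (pairList grid.length) [] (fun q hq => mem_pairList.1 hq),
    List.nil_append]
  refine mkMat_congr (fun r c hr hc => ?_)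
  obtain ⟨hdr, _⟩ := lt_sq_div_mod hr
  obtain ⟨hdc, _⟩ := lt_sq_div_mod hc
  have hm : (r / grid.length, c / grid.length) ∈ pairList grid.length :=
    mem_pairList.2 ⟨hdr, hdc⟩
  simp [Epart, hm]

lemma take_eq_map_range {l : List Int} {n : ℕ} (h : n ≤ l.length) :
    l.take n = (List.range n).map (fun j => l.getD j 0) := by
  apply List.ext_getElem
  · simp [h]
  · intro i h1 h2
    simp only [List.getElem_take, List.getElem_map, List.getElem_range]
    rw [List.getD_eq_getElem?_getD, List.getElem?_eq_getElem (by simp at h1 ⊢; omega)]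
    rfl

lemma row_eq (grid : List (List Int)) (hpre : Pre_transform grid) (br i : ℕ)
    (hi : i < grid.length) :
    (List.range grid.length).foldl (fun row bc =>
        if (grid.getD br []).getD bc 0 ≠ 0 then row ++ (grid.getD i []).take grid.length
        else row ++ List.replicate grid.length 0) []
      = (List.range (grid.length * grid.length)).map
          (fun c => if gEnt grid br (c / grid.length) ≠ 0
                    then gEnt grid i (c % grid.length) else 0) := by
  have hmem : grid.getD i [] ∈ grid := by
    rw [List.getD_eq_getElem?_getD, List.getElem?_eq_getElem hi]
    exact List.getElem_mem _
  have hlen : grid.length ≤ (grid.getD i []).length := hpre _ hmem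
  have hfun : (fun (row : List Int) bc =>
      if (grid.getD br []).getD bc 0 ≠ 0 then row ++ (grid.getD i []).take grid.length
      else row ++ List.replicate grid.length 0)
      = (fun (row : List Int) bc => row ++
          (if (grid.getD br []).getD bc 0 ≠ 0 then (grid.getD i []).take grid.length
           else List.replicate grid.length 0)) := by
    funext row bc; split <;> rfl
  rw [hfun, PySem.List.foldl_append_eq_flatMap, List.nil_append]
  have hchunks : (fun bc => if (grid.getD br []).getD bc 0 ≠ 0
        then (grid.getD i []).take grid.length else List.replicate grid.length 0)
      = (fun bc => (List.range grid.length).map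
          (fun j => if (grid.getD br []).getD bc 0 ≠ 0 then gEnt grid i j else 0)) := by
    funext bc
    by_cases h : (grid.getD br []).getD bc 0 ≠ 0
    · rw [if_pos h, take_eq_map_range hlen]
      exact List.map_congr_left (fun j _ => by rw [if_pos h]; rfl)
    · rw [if_neg h,
        show (fun j => if (grid.getD br []).getD bc 0 ≠ 0 then gEnt grid i j else 0)
          = (fun _ => (0 : Int)) from funext fun j => if_neg h,
        List.map_const', List.length_range]
  rw [hchunks, flat_blocks]
  rfl

lemma transform_alt_eq_mkMat (grid : List (List Int)) (hpre : Pre_transform grid) :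
    transform_alt grid = mkMat (grid.length * grid.length)
      (fun r c =>
        if gEnt grid (r / grid.length) (c / grid.length) ≠ 0
        then gEnt grid (r % grid.length) (c % grid.length) else 0) := by
  simp only [transform_alt]
  simp only [PySem.List.foldl_append_singleton_eq_map, PySem.List.foldl_append_eq_flatMap,
    List.nil_append]
  have hrows : ∀ br ∈ List.range grid.length,
      (List.range grid.length).map (fun i =>
        (List.range grid.length).foldl (fun row bc =>
          if (grid.getD br []).getD bc 0 ≠ 0 then row ++ (grid.getD i []).take grid.length
          else row ++ List.replicate grid.length 0) [])
      = (List.range grid.length).map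
          (fun i => (List.range (grid.length * grid.length)).map
            (fun c => if gEnt grid br (c / grid.length) ≠ 0
                      then gEnt grid i (c % grid.length) else 0)) :=
    fun br _ => List.map_congr_left
      (fun i hi => row_eq grid hpre br i (List.mem_range.1 hi))
  rw [List.flatMap_congr hrows, flat_blocks]
  rfl

-- ===== VERDICT (by name: the statement is the Claim_ definition above) =====
theorem transform_spec : Claim_equal_transform := by
  intro grid _ hpre
  unfold Spec_transform
  rw [transform_eq_mkMat, transform_alt_eq_mkMat grid hpre]
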